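-- pv_equiv track=rewrite | github.com/ocgully/mercator | codeatlas/stacks/python.py | _file_owning_system
-- ===== SOURCE A (Python) =====
-- from typing import Dict, List, Optional, Set, Tuple
--
-- def _file_owning_system(rel_posix: str, scope_to_name: List[Tuple[str, str]]) -> Optional[str]:
--     """Return the dotted system name for a file path, picking the deepest
--     owning scope. `scope_to_name` is a pre-sorted list of (scope_dir, name).
--     """
--     best: Optional[str] = None
--     best_depth = -1
--     for scope, name in scope_to_name:
--         if scope == "." or not scope:
--             depth = 0
--             owns = True
--         else:
--             owns = rel_posix == scope or rel_posix.startswith(scope + "/")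
--             depth = scope.count("/") + 1
--         if owns and depth > best_depth:
--             best, best_depth = name, depth
--     return best
-- ===== SOURCE B (Python) =====
-- from typing import List, Optional, Tuple
--
-- def _file_owning_system(rel_posix: str, scope_to_name: List[Tuple[str, str]]) -> Optional[str]:
--     """Ancestor-walk lookup: index the scopes once (first occurrence wins,
--     '.'/'' collapse to a depth-0 bucket), then try the path's own key and each
--     '/'-boundary ancestor, deepest first."""
--     table = {}
--     bucket = None
--     for scope, name in scope_to_name:
--         if scope == "." or not scope:
--             if bucket is None:
--                 bucket = name
--         elif scope not in table:
--             table[scope] = name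
--     candidates = [rel_posix] + [rel_posix[:i] for i in range(len(rel_posix) - 1, -1, -1) if rel_posix[i] == "/"]
--     for key in candidates:
--         if key in table:
--             return table[key]
--     return bucket
-- ===== Notes on version B (the rewrite author's own statement) =====
-- stated objective: alternative
-- what changed: Instead of scanning every (scope, name) pair and tracking the deepest owner, B builds a scope->name dict once (first occurrence wins, '.'/'' collapsed into a depth-0 bucket) and then probes the path's '/'-boundary ancestors deepest-first against that dict.
import Mathlib
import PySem

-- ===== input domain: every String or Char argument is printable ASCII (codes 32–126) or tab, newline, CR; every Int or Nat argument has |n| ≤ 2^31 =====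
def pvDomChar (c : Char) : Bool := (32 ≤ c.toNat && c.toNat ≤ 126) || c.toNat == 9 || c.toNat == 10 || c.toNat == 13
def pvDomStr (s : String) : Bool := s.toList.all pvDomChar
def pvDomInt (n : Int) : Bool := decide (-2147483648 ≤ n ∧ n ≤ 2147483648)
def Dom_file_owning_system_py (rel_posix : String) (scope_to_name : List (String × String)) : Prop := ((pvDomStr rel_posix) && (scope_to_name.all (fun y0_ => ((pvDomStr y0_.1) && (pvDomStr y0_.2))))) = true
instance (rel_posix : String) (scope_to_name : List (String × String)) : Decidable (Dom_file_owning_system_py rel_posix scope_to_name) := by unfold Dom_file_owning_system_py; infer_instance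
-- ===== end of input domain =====

-- B replaces A's scan over every scope with a first-occurrence lookup table plus a deepest-first walk over the path's '/'-boundary ancestors; same return value, different algorithm.


-- ===== PORT A =====
def file_owning_system_py (rel_posix : String) (scope_to_name : List (String × String)) : Option String :=
  (scope_to_name.foldl (fun (acc : Option String × Int) sn =>
      let scope := sn.1.toList
      -- depth, owns (Python's two branches, in order)
      let dep_owns : Int × Bool :=
        if scope = ['.'] ∨ scope = [] then ((0 : Int), true)
        else (((PySem.Chars.count scope ['/'] : Int) + 1),
              (rel_posix.toList == scope || PySem.Chars.startswith rel_posix.toList (scope ++ ['/'])))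
      if dep_owns.2 = true ∧ acc.2 < dep_owns.1 then (some sn.2, dep_owns.1) else acc)
    (none, (-1 : Int))).1

-- ===== PORT B =====
-- one left-to-right pass building (scope -> first name) table and the first depth-0 bucket name
def pvAltIndex (scope_to_name : List (String × String)) : PySem.Dict (List Char) String × Option String :=
  scope_to_name.foldl (fun acc sn =>
      let scope := sn.1.toList
      if scope = ['.'] ∨ scope = [] then
        (acc.1, if acc.2 = none then some sn.2 else acc.2)
      else if acc.1.contains scope then acc
      else (acc.1.insert scope sn.2, acc.2))
    (PySem.Dict.empty, none)

def file_owning_system_py_alt (rel_posix : String) (scope_to_name : List (String × String)) : Option String :=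
  let r := rel_posix.toList
  let tb := pvAltIndex scope_to_name
  -- [rel_posix] + [rel_posix[:i] for i in range(len(rel_posix)-1, -1, -1) if rel_posix[i] == "/"]
  -- (rel_posix[:i] = r.take i.toNat is exact here: every i produced by the range is ≥ 0)
  let candidates := r :: (PySem.List.pyRange ((r.length : Int) - 1) (-1) (-1)).filterMap
      (fun i => if PySem.List.pyGet? r i = some '/' then some (r.take i.toNat) else none)
  -- for key in candidates: if key in table: return table[key]
  match candidates.findSome? (fun key => tb.1.get? key) with
  | some v => some v
  | none => tb.2

-- ===== PRECONDITION & SPEC =====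
def Spec_file_owning_system_py (rel_posix : String) (scope_to_name : List (String × String)) (out : Option String) : Prop := out = file_owning_system_py_alt rel_posix scope_to_name
instance (rel_posix : String) (scope_to_name : List (String × String)) (out : Option String) : Decidable (Spec_file_owning_system_py rel_posix scope_to_name out) := by unfold Spec_file_owning_system_py; infer_instance

-- ===== CLAIM (what is proved, stated in full; the proofs are below) =====
def Claim_equal_file_owning_system_py : Prop := ∀ (rel_posix : String) (scope_to_name : List (String × String)), Dom_file_owning_system_py rel_posix scope_to_name → Spec_file_owning_system_py rel_posix scope_to_name (file_owning_system_py rel_posix scope_to_name)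


-- ===== LEMMAS AND PROOFS =====

-- abbreviations used only by the proofs
def pvBucket (sc : List Char) : Prop := sc = ['.'] ∨ sc = []

def pvOwns (r sc : List Char) : Prop := r = sc ∨ sc ++ ['/'] <+: r

-- the depth A effectively assigns to an entry: 0 for bucket scopes, count+1 for owning scopes, -1 otherwise
def pvDInt (r sc : List Char) : Int :=
  if sc = ['.'] ∨ sc = [] then 0
  else if r = sc ∨ sc ++ ['/'] <+: r then (sc.count '/' : Int) + 1 else -1

def pvMaxD (r : List Char) (l : List (String × String)) (d : Int) : Int :=
  l.foldl (fun m e => max m (pvDInt r e.1.toList)) d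

def pvCands (r : List Char) : List (List Char) :=
  r :: (PySem.List.pyRange ((r.length : Int) - 1) (-1) (-1)).filterMap
      (fun i => if PySem.List.pyGet? r i = some '/' then some (r.take i.toNat) else none)

def pvHit (l : List (String × String)) (k : List Char) : Option String :=
  (l.find? (fun e => decide (¬ (e.1.toList = ['.'] ∨ e.1.toList = []) ∧ e.1.toList = k))).map (·.2)

def pvBuck (l : List (String × String)) : Option String :=
  (l.find? (fun e => decide (e.1.toList = ['.'] ∨ e.1.toList = []))).map (·.2)

-- Python str.count of a single character is List.count
theorem pvCountGo (c : Char) : ∀ (fuel : ℕ) (l : List Char) (acc : ℕ), l.length ≤ fuel →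
    PySem.Chars.count.go [c] fuel l acc = acc + l.count c := by
  intro fuel
  induction fuel with
  | zero =>
    intro l acc h
    have : l = [] := List.length_eq_zero_iff.mp (Nat.le_zero.mp h)
    subst this
    simp [PySem.Chars.count.go]
  | succ n ih =>
    intro l acc h
    cases l with
    | nil => simp [PySem.Chars.count.go]
    | cons a t =>
      simp only [PySem.Chars.count.go]
      by_cases hc : a = c
      · subst hc
        simp only [List.isPrefixOf_cons₂, List.isPrefixOf_nil_left, BEq.rfl, Bool.and_self, if_pos]
        rw [List.length_singleton, List.drop_one, List.tail_cons,
          ih t (acc + 1) (by simpa using Nat.succ_le_succ_iff.mp h)]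
        simp
        omega
      · have : ([c].isPrefixOf (a :: t)) = false := by
          simp [List.isPrefixOf_cons₂]
          exact fun hh => hc hh.symm
        rw [this]
        simp only [Bool.false_eq_true, if_false]
        rw [ih t acc (by simpa using Nat.succ_le_succ_iff.mp h)]
        simp [hc]

theorem pvCount (s : List Char) (c : Char) : PySem.Chars.count s [c] = s.count c := by
  rw [PySem.Chars.count, if_neg (by simp)]
  rw [pvCountGo c s.length s 0 le_rfl]
  omega

theorem pvDInt_ge (r sc : List Char) : -1 ≤ pvDInt r sc := by
  unfold pvDInt; split_ifs <;> omega

theorem pvDInt_eq_zero_iff (r sc : List Char) : pvDInt r sc = 0 ↔ pvBucket sc := by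
  unfold pvDInt pvBucket
  split_ifs with h1 h2
  · simp [h1]
  · simp [h1]
    omega
  · simp [h1]

theorem pvDInt_pos (r sc : List Char) (h : 1 ≤ pvDInt r sc) :
    ¬ pvBucket sc ∧ pvOwns r sc ∧ pvDInt r sc = (sc.count '/' : Int) + 1 := by
  unfold pvDInt at *
  split_ifs at h with h1 h2
  · omega
  · refine ⟨h1, h2, ?_⟩
    rw [if_neg h1, if_pos h2]
  · omega

theorem pvDInt_of_owns (r sc : List Char) (hb : ¬ pvBucket sc) (ho : pvOwns r sc) :
    pvDInt r sc = (sc.count '/' : Int) + 1 := by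
  unfold pvDInt
  rw [if_neg (show ¬ (sc = ['.'] ∨ sc = []) from hb), if_pos (show r = sc ∨ sc ++ ['/'] <+: r from ho)]

theorem pvMaxD_le_self (r : List Char) (l : List (String × String)) : ∀ d : Int, d ≤ pvMaxD r l d := by
  induction l with
  | nil => intro d; simp [pvMaxD]
  | cons e t ih =>
    intro d
    have h1 : d ≤ max d (pvDInt r e.1.toList) := le_max_left _ _
    exact h1.trans (ih _)

theorem pvMaxD_ge (r : List Char) (l : List (String × String)) (e : String × String)
    (he : e ∈ l) (d : Int) : pvDInt r e.1.toList ≤ pvMaxD r l d := by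
  induction l generalizing d with
  | nil => cases he
  | cons a t ih =>
    rcases List.mem_cons.mp he with h | h
    · subst h
      exact (le_max_right _ _).trans (pvMaxD_le_self r t _)
    · exact ih h _

theorem pvMaxD_mem (r : List Char) (l : List (String × String)) : ∀ d : Int, d < pvMaxD r l d →
    ∃ e ∈ l, pvDInt r e.1.toList = pvMaxD r l d := by
  induction l with
  | nil => intro d h; simp [pvMaxD] at h
  | cons a t ih =>
    intro d h
    by_cases h2 : max d (pvDInt r a.1.toList) < pvMaxD r t (max d (pvDInt r a.1.toList))
    · obtain ⟨e, he, hq⟩ := ih _ h2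
      exact ⟨e, List.mem_cons_of_mem _ he, hq⟩
    · have h3 : pvMaxD r (a :: t) d = max d (pvDInt r a.1.toList) :=
        le_antisymm (not_lt.mp h2) (pvMaxD_le_self r t _)
      refine ⟨a, List.mem_cons_self, ?_⟩
      rw [h3]
      have h4 : pvMaxD r (a :: t) d = pvMaxD r t (max d (pvDInt r a.1.toList)) := rfl
      omega

theorem pvFind?_congr {α : Type} (l : List α) (p q : α → Bool) (h : ∀ a ∈ l, p a = q a) :
    l.find? p = l.find? q := by
  induction l with
  | nil => rfl
  | cons a t ih =>
    simp only [List.find?_cons]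
    rw [h a List.mem_cons_self]
    cases q a
    · exact ih (fun x hx => h x (List.mem_cons_of_mem _ hx))
    · rfl

-- one step of A's fold, rewritten through pvDInt
theorem pvStep_eq (rel : String) (acc : Option String × Int) (sn : String × String) (h : -1 ≤ acc.2) :
    (let scope := sn.1.toList
     let dep_owns : Int × Bool :=
       if scope = ['.'] ∨ scope = [] then ((0 : Int), true)
       else (((PySem.Chars.count scope ['/'] : Int) + 1),
             (rel.toList == scope || PySem.Chars.startswith rel.toList (scope ++ ['/'])))
     if dep_owns.2 = true ∧ acc.2 < dep_owns.1 then (some sn.2, dep_owns.1) else acc)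
    = if acc.2 < pvDInt rel.toList sn.1.toList then (some sn.2, pvDInt rel.toList sn.1.toList) else acc := by
  by_cases hbk : sn.1.toList = ['.'] ∨ sn.1.toList = []
  · have hd : pvDInt rel.toList sn.1.toList = 0 := (pvDInt_eq_zero_iff _ _).mpr hbk
    simp only [if_pos hbk, hd, true_and]
  · simp only [if_neg hbk]
    by_cases how : pvOwns rel.toList sn.1.toList
    · have hB : (rel.toList == sn.1.toList || PySem.Chars.startswith rel.toList (sn.1.toList ++ ['/'])) = true := by
        rcases how with h | h
        · simp [h]
        · simp [(PySem.Chars.startswith_iff _ _).mpr h]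
      have hd : pvDInt rel.toList sn.1.toList = (sn.1.toList.count '/' : Int) + 1 :=
        pvDInt_of_owns _ _ hbk how
      simp only [hB, hd, pvCount, true_and]
    · have hB : (rel.toList == sn.1.toList || PySem.Chars.startswith rel.toList (sn.1.toList ++ ['/'])) = false := by
        unfold pvOwns at how
        rw [not_or] at how
        simp only [Bool.or_eq_false_iff, beq_eq_false_iff_ne, ne_eq]
        exact ⟨how.1, by
          cases hsw : PySem.Chars.startswith rel.toList (sn.1.toList ++ ['/'])
          · rfl
          · exact absurd ((PySem.Chars.startswith_iff _ _).mp hsw) how.2⟩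
      have hd : pvDInt rel.toList sn.1.toList = -1 := by
        unfold pvDInt
        rw [if_neg hbk, if_neg (show ¬ (rel.toList = sn.1.toList ∨ sn.1.toList ++ ['/'] <+: rel.toList) from how)]
      have hlt : ¬ acc.2 < pvDInt rel.toList sn.1.toList := by
        rw [hd]; omega
      simp only [hB, Bool.false_eq_true, false_and, if_false]
      rw [if_neg hlt]
  
-- A's fold = the fold that compares pvDInt (owns/depth bridged through pvDInt)
theorem pvAfold_bridge (rel : String) : ∀ (l : List (String × String)) (b : Option String) (d : Int), -1 ≤ d →
    (l.foldl (fun (acc : Option String × Int) sn =>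
      let scope := sn.1.toList
      let dep_owns : Int × Bool :=
        if scope = ['.'] ∨ scope = [] then ((0 : Int), true)
        else (((PySem.Chars.count scope ['/'] : Int) + 1),
              (rel.toList == scope || PySem.Chars.startswith rel.toList (scope ++ ['/'])))
      if dep_owns.2 = true ∧ acc.2 < dep_owns.1 then (some sn.2, dep_owns.1) else acc) (b, d))
    = (l.foldl (fun (acc : Option String × Int) e =>
        if acc.2 < pvDInt rel.toList e.1.toList then (some e.2, pvDInt rel.toList e.1.toList) else acc) (b, d)) := by
  intro l
  induction l with
  | nil => intro b d h; rfl
  | cons e t ih =>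
    intro b d h
    simp only [List.foldl_cons]
    rw [pvStep_eq rel (b, d) e h]
    by_cases hlt : d < pvDInt rel.toList e.1.toList
    · rw [if_pos hlt]
      exact ih _ _ (by have := pvDInt_ge rel.toList e.1.toList; omega)
    · rw [if_neg hlt]
      exact ih _ _ h

-- first-argmax characterisation of the reference fold
theorem pvRef_spec (r : List Char) : ∀ (l : List (String × String)) (b : Option String) (d : Int),
    (l.foldl (fun (acc : Option String × Int) e =>
        if acc.2 < pvDInt r e.1.toList then (some e.2, pvDInt r e.1.toList) else acc) (b, d)).1
    = match l.find? (fun e => decide (pvDInt r e.1.toList = pvMaxD r l d ∧ d < pvDInt r e.1.toList)) with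
      | some e => some e.2
      | none => b := by
  intro l
  induction l with
  | nil => intro b d; rfl
  | cons e t ih =>
    intro b d
    simp only [List.foldl_cons]
    have hMcons : pvMaxD r (e :: t) d = pvMaxD r t (max d (pvDInt r e.1.toList)) := rfl
    by_cases h : d < pvDInt r e.1.toList
    · rw [if_pos h]
      rw [ih (some e.2) (pvDInt r e.1.toList)]
      have hmax : max d (pvDInt r e.1.toList) = pvDInt r e.1.toList := max_eq_right h.le
      by_cases he : pvDInt r e.1.toList = pvMaxD r t (pvDInt r e.1.toList)
      · have hfind : t.find? (fun e' => decide (pvDInt r e'.1.toList = pvMaxD r t (pvDInt r e.1.toList) ∧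
            pvDInt r e.1.toList < pvDInt r e'.1.toList)) = none := by
          rw [List.find?_eq_none]
          intro x hx hpx
          simp only [decide_eq_true_eq] at hpx
          omega
        rw [hfind]
        have hpe : (fun e' : String × String => decide (pvDInt r e'.1.toList = pvMaxD r (e :: t) d ∧
            d < pvDInt r e'.1.toList)) e = true := by
          simp only [decide_eq_true_eq]
          rw [hMcons, hmax]
          exact ⟨he, h⟩
        rw [List.find?_cons_of_pos (p := fun e' : String × String => decide (pvDInt r e'.1.toList = pvMaxD r (e :: t) d ∧ d < pvDInt r e'.1.toList)) hpe]
      · have hlt : pvDInt r e.1.toList < pvMaxD r t (pvDInt r e.1.toList) :=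
          lt_of_le_of_ne (pvMaxD_le_self r t _) he
        have hpe : ¬ ((fun e' : String × String => decide (pvDInt r e'.1.toList = pvMaxD r (e :: t) d ∧
            d < pvDInt r e'.1.toList)) e = true) := by
          simp only [decide_eq_true_eq, not_and]
          intro h1 _
          rw [hMcons, hmax] at h1
          exact he h1
        rw [List.find?_cons_of_neg (p := fun e' : String × String => decide (pvDInt r e'.1.toList = pvMaxD r (e :: t) d ∧ d < pvDInt r e'.1.toList)) hpe]
        rw [hMcons, hmax]
        rw [pvFind?_congr t
          (fun e' : String × String => decide (pvDInt r e'.1.toList = pvMaxD r t (pvDInt r e.1.toList) ∧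
            pvDInt r e.1.toList < pvDInt r e'.1.toList))
          (fun e' : String × String => decide (pvDInt r e'.1.toList = pvMaxD r t (pvDInt r e.1.toList) ∧
            d < pvDInt r e'.1.toList))
          (by
            intro x hx
            simp only [decide_eq_decide]
            constructor
            · rintro ⟨h1, h2⟩; exact ⟨h1, by omega⟩
            · rintro ⟨h1, h2⟩; exact ⟨h1, by omega⟩)]
        obtain ⟨x, hx, hxe⟩ := pvMaxD_mem r t (pvDInt r e.1.toList) hlt
        cases hfind : t.find? (fun e' => decide (pvDInt r e'.1.toList = pvMaxD r t (pvDInt r e.1.toList) ∧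
            d < pvDInt r e'.1.toList)) with
        | some y => rfl
        | none =>
          exfalso
          have := List.find?_eq_none.mp hfind x hx
          simp only [decide_eq_true_eq, not_and] at this
          omega
    · rw [if_neg h]
      rw [ih b d]
      have hmax : max d (pvDInt r e.1.toList) = d := max_eq_left (not_lt.mp h)
      have hpe : ¬ ((fun e' : String × String => decide (pvDInt r e'.1.toList = pvMaxD r (e :: t) d ∧
          d < pvDInt r e'.1.toList)) e = true) := by
        simp only [decide_eq_true_eq, not_and]
        intro _
        exact h
      rw [List.find?_cons_of_neg (p := fun e' : String × String => decide (pvDInt r e'.1.toList = pvMaxD r (e :: t) d ∧ d < pvDInt r e'.1.toList)) hpe, hMcons, hmax]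

-- characterisation of B's index pass
theorem pvIndex_fst : ∀ (l : List (String × String)) (t : PySem.Dict (List Char) String) (b : Option String)
    (k : List Char),
    ((l.foldl (fun (acc : PySem.Dict (List Char) String × Option String) sn =>
      let scope := sn.1.toList
      if scope = ['.'] ∨ scope = [] then
        (acc.1, if acc.2 = none then some sn.2 else acc.2)
      else if acc.1.contains scope then acc
      else (acc.1.insert scope sn.2, acc.2)) (t, b)).1).get? k
    = match t.get? k with
      | some v => some v
      | none => pvHit l k := by
  intro l
  induction l with
  | nil =>
    intro t b k
    simp only [List.foldl_nil]
    cases t.get? k <;> rfl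
  | cons e t' ih =>
    intro t b k
    simp only [List.foldl_cons]
    by_cases hbk : e.1.toList = ['.'] ∨ e.1.toList = []
    · rw [if_pos hbk]
      rw [ih]
      have hpe : ¬ ((fun e' : String × String =>
          decide (¬ (e'.1.toList = ['.'] ∨ e'.1.toList = []) ∧ e'.1.toList = k)) e = true) := by
        simp only [decide_eq_true_eq, not_and]
        intro hb
        exact absurd hbk hb
      unfold pvHit
      rw [List.find?_cons_of_neg (p := fun e' : String × String =>
        decide (¬ (e'.1.toList = ['.'] ∨ e'.1.toList = []) ∧ e'.1.toList = k)) hpe]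
    · rw [if_neg hbk]
      by_cases hk : e.1.toList = k
      · subst hk
        by_cases hc : t.contains e.1.toList
        · rw [if_pos hc]
          rw [ih]
          have hsome : ∃ v, t.get? e.1.toList = some v := by
            have := PySem.Dict.contains_eq_isSome_get? t e.1.toList
            rw [hc] at this
            exact Option.isSome_iff_exists.mp this.symm
          obtain ⟨v, hv⟩ := hsome
          rw [hv]
        · rw [if_neg hc]
          rw [ih]
          rw [PySem.Dict.get?_insert]
          rw [if_pos rfl]
          have hnone : t.get? e.1.toList = none := by
            have := PySem.Dict.contains_eq_isSome_get? t e.1.toList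
            rw [Bool.not_eq_true] at hc
            rw [hc] at this
            exact Option.not_isSome_iff_eq_none.mp (by rw [← this]; simp)
          rw [hnone]
          unfold pvHit
          have hpe : (fun e' : String × String =>
              decide (¬ (e'.1.toList = ['.'] ∨ e'.1.toList = []) ∧ e'.1.toList = e.1.toList)) e = true := by
            simp only [decide_eq_true_eq]
            exact ⟨hbk, trivial⟩
          rw [List.find?_cons_of_pos (p := fun e' : String × String =>
            decide (¬ (e'.1.toList = ['.'] ∨ e'.1.toList = []) ∧ e'.1.toList = e.1.toList)) hpe]
          rfl
      · have hpe : ¬ ((fun e' : String × String =>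
            decide (¬ (e'.1.toList = ['.'] ∨ e'.1.toList = []) ∧ e'.1.toList = k)) e = true) := by
          simp only [decide_eq_true_eq, not_and]
          intro _
          exact hk
        have hfind : pvHit (e :: t') k = pvHit t' k := by
          unfold pvHit
          rw [List.find?_cons_of_neg (p := fun e' : String × String =>
            decide (¬ (e'.1.toList = ['.'] ∨ e'.1.toList = []) ∧ e'.1.toList = k)) hpe]
        rw [hfind]
        by_cases hc : t.contains e.1.toList
        · rw [if_pos hc]
          exact ih t b k
        · rw [if_neg hc]
          rw [ih]
          rw [PySem.Dict.get?_insert]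
          rw [if_neg (fun hh => hk hh.symm)]

theorem pvIndex_snd : ∀ (l : List (String × String)) (t : PySem.Dict (List Char) String) (b : Option String),
    ((l.foldl (fun (acc : PySem.Dict (List Char) String × Option String) sn =>
      let scope := sn.1.toList
      if scope = ['.'] ∨ scope = [] then
        (acc.1, if acc.2 = none then some sn.2 else acc.2)
      else if acc.1.contains scope then acc
      else (acc.1.insert scope sn.2, acc.2)) (t, b)).2)
    = match b with
      | some v => some v
      | none => pvBuck l := by
  intro l
  induction l with
  | nil =>
    intro t b
    cases b <;> rfl
  | cons e t' ih =>
    intro t b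
    simp only [List.foldl_cons]
    by_cases hbk : e.1.toList = ['.'] ∨ e.1.toList = []
    · rw [if_pos hbk]
      have hpe : (fun e' : String × String => decide (e'.1.toList = ['.'] ∨ e'.1.toList = [])) e = true := by
        simp only [decide_eq_true_eq]
        exact hbk
      cases b with
      | none =>
        rw [ih]
        unfold pvBuck
        rw [List.find?_cons_of_pos (p := fun e' : String × String =>
          decide (e'.1.toList = ['.'] ∨ e'.1.toList = [])) hpe]
        simp
      | some v =>
        rw [ih]
        simp
    · rw [if_neg hbk]
      have hpe : ¬ ((fun e' : String × String => decide (e'.1.toList = ['.'] ∨ e'.1.toList = [])) e = true) := by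
        simp only [decide_eq_true_eq]
        exact hbk
      have hbuck : pvBuck (e :: t') = pvBuck t' := by
        unfold pvBuck
        rw [List.find?_cons_of_neg (p := fun e' : String × String =>
          decide (e'.1.toList = ['.'] ∨ e'.1.toList = [])) hpe]
      rw [hbuck]
      by_cases hc : t.contains e.1.toList
      · rw [if_pos hc]
        exact ih t b
      · rw [if_neg hc]
        exact ih _ b

theorem pvMem_candsTail (r : List Char) (k : List Char) :
    k ∈ (PySem.List.pyRange ((r.length : Int) - 1) (-1) (-1)).filterMap
      (fun i => if PySem.List.pyGet? r i = some '/' then some (r.take i.toNat) else none)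
    ↔ ∃ i : ℕ, i < r.length ∧ r[i]? = some '/' ∧ k = r.take i := by
  rw [PySem.List.pyRange_neg_one]
  have hresz : ((r.length : Int) - 1 - (-1)).toNat = r.length := by omega
  rw [hresz]
  constructor
  · intro h
    obtain ⟨i, hi, hf⟩ := List.mem_filterMap.mp h
    obtain ⟨j, hj, hji⟩ := List.mem_map.mp hi
    have hjlt : j < r.length := List.mem_range.mp hj
    set m : ℕ := r.length - 1 - j with hm
    have him : i = (m : Int) := by omega
    subst him
    rw [PySem.List.pyGet?_natCast] at hf
    by_cases hc : r[m]? = some '/'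
    · rw [if_pos hc] at hf
      refine ⟨m, by omega, hc, ?_⟩
      simp only [Int.toNat_natCast] at hf
      exact (Option.some_injective _ hf).symm
    · rw [if_neg hc] at hf
      cases hf
  · rintro ⟨m, hm, hget, hk⟩
    apply List.mem_filterMap.mpr
    refine ⟨(m : Int), ?_, ?_⟩
    · apply List.mem_map.mpr
      refine ⟨r.length - 1 - m, List.mem_range.mpr (by omega), by omega⟩
    · rw [PySem.List.pyGet?_natCast, if_pos hget, Int.toNat_natCast, hk]

theorem pvCount_take_lt (r : List Char) (j i : ℕ) (hj : j < i) (_hi : i ≤ r.length)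
    (h : r[j]? = some '/') : (r.take j).count '/' < (r.take i).count '/' := by
  obtain ⟨hjl, hjv⟩ := List.getElem?_eq_some_iff.mp h
  have hsplit : r.take i = r.take j ++ (r.drop j).take (i - j) := by
    have h6 := List.take_add (l := r) (i := j) (j := i - j)
    rw [show j + (i - j) = i by omega] at h6
    exact h6
  rw [hsplit, List.count_append]
  have hdrop : r.drop j = r[j] :: r.drop (j + 1) := List.drop_eq_getElem_cons hjl
  have h7 : (r.drop j).take (i - j) = r[j] :: (r.drop (j + 1)).take (i - j - 1) := by
    rw [hdrop]
    have h8 : i - j = (i - j - 1) + 1 := by omega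
    rw [h8, List.take_succ_cons]
    simp
  rw [h7, hjv]
  simp

theorem pvCands_sorted (r : List Char) :
    (pvCands r).Pairwise (fun a b => b.count '/' < a.count '/') := by
  unfold pvCands
  rw [List.pairwise_cons]
  constructor
  · intro k hk
    obtain ⟨i, hi, hget, hk'⟩ := (pvMem_candsTail r k).mp hk
    rw [hk']
    have := pvCount_take_lt r i r.length hi le_rfl hget
    rwa [List.take_length] at this
  · -- tail: filterMap over strictly decreasing indices
    have hpw : (PySem.List.pyRange ((r.length : Int) - 1) (-1) (-1)).Pairwise (fun a b => b < a) := by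
      rw [PySem.List.pyRange_neg_one]
      apply List.pairwise_map.mpr
      exact List.pairwise_lt_range.imp (by intro a b hab; omega)
    have hmemrange : ∀ i ∈ PySem.List.pyRange ((r.length : Int) - 1) (-1) (-1),
        0 ≤ i ∧ i < (r.length : Int) := by
      intro i hi
      rw [PySem.List.pyRange_neg_one] at hi
      obtain ⟨j, hj, hji⟩ := List.mem_map.mp hi
      have := List.mem_range.mp hj
      omega
    -- reduce filterMap's Pairwise to the index list's Pairwise
    have key : ∀ (idx : List Int), idx.Pairwise (fun a b => b < a) →
        (∀ i ∈ idx, 0 ≤ i ∧ i < (r.length : Int)) →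
        (idx.filterMap (fun i => if PySem.List.pyGet? r i = some '/' then some (r.take i.toNat) else none)).Pairwise
          (fun a b => b.count '/' < a.count '/') := by
      intro idx
      induction idx with
      | nil => intro _ _; simp
      | cons a t ih =>
        intro hpw hmem
        rw [List.filterMap_cons]
        have hpw' := (List.pairwise_cons.mp hpw).2
        have hmem' : ∀ i ∈ t, 0 ≤ i ∧ i < (r.length : Int) := fun i hi => hmem i (List.mem_cons_of_mem _ hi)
        by_cases hca : PySem.List.pyGet? r a = some '/'
        case neg =>
          simp only [if_neg hca]
          exact ih hpw' hmem'
        case pos =>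
          simp only [if_pos hca]
          rw [List.pairwise_cons]
          refine ⟨?_, ih hpw' hmem'⟩
          intro k hk
          obtain ⟨b, hb, hbf⟩ := List.mem_filterMap.mp hk
          by_cases hbc : PySem.List.pyGet? r b = some '/'
          case neg => rw [if_neg hbc] at hbf; cases hbf
          case pos =>
            rw [if_pos hbc] at hbf
            have hk' : k = r.take b.toNat := (Option.some_injective _ hbf).symm
            have hba : b < a := (List.pairwise_cons.mp hpw).1 b hb
            obtain ⟨hb0, hblt⟩ := hmem b (List.mem_cons_of_mem _ hb)
            obtain ⟨ha0, halt⟩ := hmem a List.mem_cons_self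
            have hbn : (b.toNat : Int) = b := Int.toNat_of_nonneg hb0
            have hbc' : r[b.toNat]? = some '/' := by
              rw [← PySem.List.pyGet?_natCast, hbn]; exact hbc
            rw [hk']
            exact pvCount_take_lt r b.toNat a.toNat (by omega) (by omega) hbc'
    exact key _ hpw hmemrange

theorem pvCands_owns (r k : List Char) (h : k ∈ pvCands r) : pvOwns r k := by
  rcases List.mem_cons.mp h with h | h
  · exact Or.inl h.symm
  · obtain ⟨i, hi, hget, hk⟩ := (pvMem_candsTail r k).mp h
    right
    obtain ⟨hlt, hv⟩ := List.getElem?_eq_some_iff.mp hget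
    have : k ++ ['/'] = r.take (i + 1) := by
      rw [List.take_succ, hget, hk]
      rfl
    rw [this]
    exact List.take_prefix _ _

theorem pvOwns_mem_cands (r k : List Char) (h : pvOwns r k) : k ∈ pvCands r := by
  rcases h with h | h
  · exact h ▸ List.mem_cons_self
  · apply List.mem_cons_of_mem
    apply (pvMem_candsTail r k).mpr
    have hpre : k <+: r := (List.prefix_append k ['/']).trans h
    have hlen : k.length + 1 ≤ r.length := by
      have := h.length_le
      simpa using this
    have hk : k = r.take k.length := List.prefix_iff_eq_take.mp hpre
    have h1 : k ++ ['/'] = r.take (k.length + 1) := by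
      have := List.prefix_iff_eq_take.mp h
      simpa using this
    rw [List.take_succ, ← hk] at h1
    have h2 : r[k.length]?.toList = ['/'] := by
      have := List.append_cancel_left h1
      exact this.symm
    have h3 : r[k.length]? = some '/' := by
      cases hg : r[k.length]? with
      | none => rw [hg] at h2; cases h2
      | some a => rw [hg] at h2; simp at h2; rw [h2]
    exact ⟨k.length, by omega, h3, hk⟩

theorem pvOwns_prefix (r a : List Char) (h : pvOwns r a) : a <+: r := by
  rcases h with h | h
  · exact h ▸ List.prefix_refl a
  · exact (List.prefix_append a ['/']).trans h

theorem pvOwns_count_inj (r a b : List Char) (ha : pvOwns r a) (hb : pvOwns r b)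
    (h : a.count '/' = b.count '/') : a = b := by
  have key : ∀ x y : List Char, pvOwns r x → pvOwns r y → x.length < y.length →
      x.count '/' < y.count '/' := by
    intro x y hx hy hlt
    have hyr : y <+: r := pvOwns_prefix r y hy
    have hxy : x ≠ r := by
      intro hh
      have h9 := hyr.length_le
      rw [hh] at hlt
      omega
    have hx2 : x ++ ['/'] <+: r := hx.resolve_left (fun hh => hxy hh.symm)
    have h1 : x ++ ['/'] = r.take (x.length + 1) := by
      have := List.prefix_iff_eq_take.mp hx2
      simpa using this
    have h2 : y = r.take y.length := List.prefix_iff_eq_take.mp hyr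
    have h3 : x ++ ['/'] <+: y := by
      rw [h1, h2]
      have h5 : r.take (x.length + 1) = (r.take y.length).take (x.length + 1) := by
        rw [List.take_take, min_eq_left (by omega)]
      rw [h5]
      exact List.take_prefix _ _
    have h4 : (x ++ ['/']).count '/' ≤ y.count '/' := h3.sublist.count_le _
    simp [List.count_append] at h4
    omega
  rcases lt_trichotomy a.length b.length with hl | hl | hl
  · exact absurd h (key a b ha hb hl).ne
  · have ha' : a = r.take a.length := List.prefix_iff_eq_take.mp (pvOwns_prefix r a ha)
    have hb' : b = r.take b.length := List.prefix_iff_eq_take.mp (pvOwns_prefix r b hb)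
    rw [ha', hb', hl]
  · exact absurd h.symm (key b a hb ha hl).ne

theorem pvFindSome (hit : List Char → Option String) : ∀ (cands : List (List Char)),
    cands.Pairwise (fun a b => b.count '/' < a.count '/') →
    ∀ (x : List Char), x ∈ cands → ∀ v, hit x = some v →
    (∀ k ∈ cands, x.count '/' < k.count '/' → hit k = none) →
    cands.findSome? hit = some v := by
  intro cands hpw x hx v hv hnone
  induction cands with
  | nil => cases hx
  | cons c cs ih =>
    rw [List.findSome?_cons]
    by_cases hc : c = x
    · subst hc; rw [hv]
    · have hxs : x ∈ cs := (List.mem_cons.mp hx).resolve_left (fun hh => hc hh.symm)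
      have hlt : x.count '/' < c.count '/' := (List.pairwise_cons.mp hpw).1 x hxs
      rw [hnone c List.mem_cons_self hlt]
      exact ih (List.pairwise_cons.mp hpw).2 hxs
        (fun k hk hlt2 => hnone k (List.mem_cons_of_mem _ hk) hlt2)

theorem pvHit_none_or (l : List (String × String)) (k : List Char) :
    pvHit l k = none ∨ ∃ e ∈ l, ¬ pvBucket e.1.toList ∧ e.1.toList = k := by
  unfold pvHit
  cases hf : l.find? (fun e => decide (¬ (e.1.toList = ['.'] ∨ e.1.toList = []) ∧ e.1.toList = k)) with
  | none => exact Or.inl rfl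
  | some e =>
    right
    have h1 := List.find?_some hf
    have h2 := List.mem_of_find?_eq_some hf
    simp only [decide_eq_true_eq] at h1
    exact ⟨e, h2, h1⟩


-- the two characterisations coincide
theorem pvMain (r : List Char) (l : List (String × String)) :
    (match l.find? (fun e => decide (pvDInt r e.1.toList = pvMaxD r l (-1) ∧ -1 < pvDInt r e.1.toList)) with
      | some e => some e.2
      | none => (none : Option String))
    = match (pvCands r).findSome? (fun k => pvHit l k) with
      | some v => some v
      | none => pvBuck l := by
  have hMge : -1 ≤ pvMaxD r l (-1) := pvMaxD_le_self r l (-1)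
  have hub : ∀ e ∈ l, pvDInt r e.1.toList ≤ pvMaxD r l (-1) := fun e he => pvMaxD_ge r l e he (-1)
  by_cases h1 : pvMaxD r l (-1) = -1
  · -- nothing owns at all: both sides are none
    have hL : l.find? (fun e => decide (pvDInt r e.1.toList = pvMaxD r l (-1) ∧ -1 < pvDInt r e.1.toList)) = none := by
      rw [List.find?_eq_none]
      intro x _ hx
      simp only [decide_eq_true_eq] at hx
      omega
    have hR : (pvCands r).findSome? (fun k => pvHit l k) = none := by
      rw [List.findSome?_eq_none_iff]
      intro k hk
      rcases pvHit_none_or l k with h | ⟨e, he, hnb, hsc⟩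
      · exact h
      · exfalso
        have how : pvOwns r e.1.toList := hsc ▸ pvCands_owns r k hk
        have := pvDInt_of_owns r e.1.toList hnb how
        have := hub e he
        omega
    have hBk : pvBuck l = none := by
      unfold pvBuck
      rw [show l.find? (fun e => decide (e.1.toList = ['.'] ∨ e.1.toList = [])) = none from ?_]
      · rfl
      · rw [List.find?_eq_none]
        intro x hx hb
        simp only [decide_eq_true_eq] at hb
        have := (pvDInt_eq_zero_iff r x.1.toList).mpr hb
        have := hub x hx
        omega
    rw [hL, hR, hBk]
  · by_cases h2 : pvMaxD r l (-1) = 0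
    · -- only bucket entries own: both sides are the first bucket name
      have hR : (pvCands r).findSome? (fun k => pvHit l k) = none := by
        rw [List.findSome?_eq_none_iff]
        intro k hk
        rcases pvHit_none_or l k with h | ⟨e, he, hnb, hsc⟩
        · exact h
        · exfalso
          have how : pvOwns r e.1.toList := hsc ▸ pvCands_owns r k hk
          have := pvDInt_of_owns r e.1.toList hnb how
          have := hub e he
          have hcn : (0 : Int) ≤ (e.1.toList.count '/' : Int) := by positivity
          omega
      rw [hR]
      rw [pvFind?_congr l _ (fun e => decide (e.1.toList = ['.'] ∨ e.1.toList = [])) (by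
        intro a _
        simp only [decide_eq_decide]
        constructor
        · rintro ⟨ha, _⟩
          exact (pvDInt_eq_zero_iff r a.1.toList).mp (by omega)
        · intro hbk
          have := (pvDInt_eq_zero_iff r a.1.toList).mpr hbk
          constructor <;> omega)]
      unfold pvBuck
      cases l.find? (fun e => decide (e.1.toList = ['.'] ∨ e.1.toList = [])) <;> rfl
    · -- some real scope owns: both sides are the first entry at the deepest owning scope
      obtain ⟨e0, he0, hd0⟩ := pvMaxD_mem r l (-1) (by omega)
      obtain ⟨hnb0, how0, hcnt0⟩ := pvDInt_pos r e0.1.toList (by omega)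
      have hy : ∃ y, l.find? (fun e => decide (¬ (e.1.toList = ['.'] ∨ e.1.toList = []) ∧ e.1.toList = e0.1.toList)) = some y := by
        apply Option.isSome_iff_exists.mp
        rw [List.find?_isSome]
        refine ⟨e0, he0, ?_⟩
        simp only [decide_eq_true_eq]
        exact ⟨hnb0, trivial⟩
      obtain ⟨y, hy⟩ := hy
      have hR : (pvCands r).findSome? (fun k => pvHit l k) = some y.2 := by
        apply pvFindSome (fun k => pvHit l k) (pvCands r) (pvCands_sorted r) e0.1.toList
          (pvOwns_mem_cands r e0.1.toList how0) y.2
        · unfold pvHit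
          rw [hy]
          rfl
        · intro k hk hlt
          rcases pvHit_none_or l k with h | ⟨e, he, hnb, hsc⟩
          · exact h
          · exfalso
            have how : pvOwns r e.1.toList := hsc ▸ pvCands_owns r k hk
            have hde := pvDInt_of_owns r e.1.toList hnb how
            have hle := hub e he
            have hck : e.1.toList.count '/' = k.count '/' := by rw [hsc]
            omega
      rw [hR]
      rw [pvFind?_congr l _ (fun e => decide (¬ (e.1.toList = ['.'] ∨ e.1.toList = []) ∧ e.1.toList = e0.1.toList)) (by
        intro a _
        simp only [decide_eq_decide]
        constructor
        · rintro ⟨ha, _⟩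
          obtain ⟨hnb, how, hc⟩ := pvDInt_pos r a.1.toList (by omega)
          have hcc : a.1.toList.count '/' = e0.1.toList.count '/' := by omega
          exact ⟨hnb, pvOwns_count_inj r a.1.toList e0.1.toList how how0 hcc⟩
        · rintro ⟨hnb, hsc⟩
          have hda := pvDInt_of_owns r a.1.toList hnb (hsc ▸ how0)
          have hck : a.1.toList.count '/' = e0.1.toList.count '/' := by rw [hsc]
          constructor <;> omega)]
      rw [hy]

-- ===== VERDICT (by name: the statement is the Claim_ definition above) =====
theorem file_owning_system_py_spec : Claim_equal_file_owning_system_py := by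
  intro rel l _
  unfold Spec_file_owning_system_py
  have hB : file_owning_system_py_alt rel l =
      match (pvCands rel.toList).findSome? (fun k => pvHit l k) with
      | some v => some v
      | none => pvBuck l := by
    unfold file_owning_system_py_alt pvAltIndex pvCands
    simp only [pvIndex_fst, pvIndex_snd, PySem.Dict.get?_empty]
  rw [hB]
  unfold file_owning_system_py
  rw [pvAfold_bridge rel l none (-1) (by omega)]
  rw [pvRef_spec rel.toList l none (-1)]
  exact pvMain rel.toList l
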